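-- pv_equiv track=rewrite | github.com/yassinefkh/BooleanNetwork | src/network.py | detect_attractors
-- ===== SOURCE A (Python) =====
-- def detect_attractors(states):
--     """
--     Detects attractors in the network states.
--
--     Args:
--         states (list): List of states to analyze.
--
--     Returns:
--         list: List of attractors found in the states.
--     """
--     attractors = []
--     for i, state in enumerate(states):
--         attractor_found = False
--         for j in range(i + 1, len(states)):
--             if state == states[j]:
--                 attractors.append(states[i:j])
--                 attractor_found = True
--                 break
--         if attractor_found:
--             break
--     return attractors
-- ===== SOURCE B (Python) =====
-- def detect_attractors(states):
--     """
--     Detects attractors in the network states.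
--
--     Alternative single pass: remember each state's first index in a dict; on a repeat,
--     keep the candidate (first_index, repeat_index) with the smallest first
--     index.  Returns [states[i:j]] for that pair, or [] if no state repeats.
--     """
--     first = {}
--     best = None  # (first occurrence, first repeat) with minimal first occurrence
--     for j, state in enumerate(states):
--         key = tuple(state)
--         if key in first:
--             i = first[key]
--             if best is None or i < best[0]:
--                 best = (i, j)
--         else:
--             first[key] = j
--     if best is None:
--         return []
--     return [states[best[0]:best[1]]]
-- ===== Notes on version B (the rewrite author's own statement) =====
-- stated objective: alternative
-- what changed: Replaced the nested scan (for each i, search all later j for an equal state, breaking at the first hit) by a single pass that hashes each state to its first index and tracks the candidate (first occurrence, first repeat) pair with the smallest first occurrence.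
import Mathlib
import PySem

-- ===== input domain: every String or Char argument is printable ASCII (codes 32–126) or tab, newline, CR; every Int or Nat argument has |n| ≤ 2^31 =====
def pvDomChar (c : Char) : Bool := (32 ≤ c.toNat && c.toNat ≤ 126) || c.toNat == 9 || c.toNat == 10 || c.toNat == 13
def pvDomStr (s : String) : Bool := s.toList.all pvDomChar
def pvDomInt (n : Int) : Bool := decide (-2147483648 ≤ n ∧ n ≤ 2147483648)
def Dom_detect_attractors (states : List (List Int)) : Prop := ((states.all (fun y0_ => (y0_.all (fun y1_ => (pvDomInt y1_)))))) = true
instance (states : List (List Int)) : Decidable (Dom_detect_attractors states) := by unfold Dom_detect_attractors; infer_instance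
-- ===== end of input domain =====

-- B replaces A's nested scan-with-break by a single hashing pass that tracks the
-- lexicographically least (first occurrence, first repeat) pair (objective: alternative).

-- ===== PORT A =====
-- inner loop: for j in range(i+1, len(states)): if state == states[j]: break with j
def findJA (states : List (List Int)) (state : List Int) : List Int → Option Int
  | [] => none
  | j :: rest =>
    if PySem.List.pyGet? states j = some state then some j else findJA states state rest

-- outer loop over enumerate(states) with break once an attractor is found
def loopA (states : List (List Int)) : List (Int × List Int) → List (List (List Int))
  | [] => []
  | (i, state) :: rest =>
    match findJA states state (PySem.List.pyRange (i + 1) (states.length : Int) 1) with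
    | some j => [PySem.List.slice states (some i) (some j)]
    | none => loopA states rest

def detect_attractors (states : List (List Int)) : List (List (List Int)) :=
  loopA states (PySem.List.enumerate states 0)

-- ===== PORT B =====
-- one fold step: dict 'first' of first indices, 'best' = candidate (i, j) with minimal i
def stepB (acc : PySem.Dict (List Int) Int × Option (Int × Int)) (e : Int × List Int) :
    PySem.Dict (List Int) Int × Option (Int × Int) :=
  match acc.1.get? e.2 with
  | some i =>
    match acc.2 with
    | none => (acc.1, some (i, e.1))
    | some b => if i < b.1 then (acc.1, some (i, e.1)) else (acc.1, some b)
  | none => (acc.1.insert e.2 e.1, acc.2)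

def detect_attractors_alt (states : List (List Int)) : List (List (List Int)) :=
  let r := (PySem.List.enumerate states 0).foldl stepB (PySem.Dict.empty, none)
  match r.2 with
  | none => []
  | some b => [PySem.List.slice states (some b.1) (some b.2)]

-- ===== PRECONDITION & SPEC =====
def Spec_detect_attractors (states : List (List Int)) (out : List (List (List Int))) : Prop := out = detect_attractors_alt states
instance (states : List (List Int)) (out : List (List (List Int))) : Decidable (Spec_detect_attractors states out) := by unfold Spec_detect_attractors; infer_instance

-- ===== CLAIM (what is proved, stated in full; the proofs are below) =====
def Claim_equal_detect_attractors : Prop := ∀ (states : List (List Int)), Dom_detect_attractors states → Spec_detect_attractors states (detect_attractors states)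

-- ===== LEMMAS AND PROOFS =====

-- (i, j) is a "duplicate pair": same state at two indices
def Pair (xs : List (List Int)) (i j : Int) : Prop :=
  0 ≤ i ∧ i < j ∧ j < (xs.length : Int) ∧ PySem.List.pyGet? xs i = PySem.List.pyGet? xs j

-- result r is the lex-least duplicate pair among those with lo ≤ i (A's search order)
def IsMinFromA (xs : List (List Int)) (lo : Int) : Option (Int × Int) → Prop
  | none => ∀ i j, lo ≤ i → ¬ Pair xs i j
  | some p => Pair xs p.1 p.2 ∧ lo ≤ p.1 ∧
      ∀ i' j', lo ≤ i' → Pair xs i' j' → p.1 < i' ∨ (p.1 = i' ∧ p.2 ≤ j')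

-- result r is the lex-least duplicate pair among those with j < hi (B's invariant)
def IsMinUpto (xs : List (List Int)) (hi : Int) : Option (Int × Int) → Prop
  | none => ∀ i j, j < hi → ¬ Pair xs i j
  | some p => Pair xs p.1 p.2 ∧ p.2 < hi ∧
      ∀ i' j', j' < hi → Pair xs i' j' → p.1 < i' ∨ (p.1 = i' ∧ p.2 ≤ j')

def renderI (xs : List (List Int)) : Option (Int × Int) → List (List (List Int))
  | none => []
  | some p => [PySem.List.slice xs (some p.1) (some p.2)]

def DictInv (xs : List (List Int)) (m : Int) (d : PySem.Dict (List Int) Int) : Prop :=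
  ∀ v i, d.get? v = some i ↔
    (0 ≤ i ∧ i < m ∧ PySem.List.pyGet? xs i = some v ∧
      ∀ i', 0 ≤ i' → i' < i → PySem.List.pyGet? xs i' ≠ some v)

theorem findJA_range (xs : List (List Int)) (st : List Int) :
    ∀ fuel (a : Int), (((xs.length : Int) - a).toNat = fuel) →
    (findJA xs st (PySem.List.pyRange a (xs.length : Int) 1) = none →
        ∀ j, a ≤ j → j < (xs.length : Int) → PySem.List.pyGet? xs j ≠ some st) ∧
    (∀ j, findJA xs st (PySem.List.pyRange a (xs.length : Int) 1) = some j →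
        a ≤ j ∧ j < (xs.length : Int) ∧ PySem.List.pyGet? xs j = some st ∧
        ∀ j', a ≤ j' → j' < j → PySem.List.pyGet? xs j' ≠ some st) := by
  intro fuel
  induction fuel with
  | zero =>
    intro a ha
    have hnil : PySem.List.pyRange a (xs.length : Int) 1 = [] :=
      PySem.List.pyRange_one_eq_nil (by omega)
    rw [hnil]
    constructor
    · intro _ j hj1 hj2; omega
    · intro j hj; simp [findJA] at hj
  | succ n ih =>
    intro a ha
    have hab : a < (xs.length : Int) := by omega
    rw [PySem.List.pyRange_one_cons hab]
    by_cases hmatch : PySem.List.pyGet? xs a = some st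
    · constructor
      · intro hn; simp [findJA, hmatch] at hn
      · intro j hj
        simp [findJA, hmatch] at hj
        subst hj
        exact ⟨le_rfl, hab, hmatch, by intro j' h1 h2 _; omega⟩
    · have hstep : findJA xs st (a :: PySem.List.pyRange (a + 1) (xs.length : Int) 1) =
          findJA xs st (PySem.List.pyRange (a + 1) (xs.length : Int) 1) := by
        simp [findJA, hmatch]
      rw [hstep]
      obtain ⟨ihn, ihs⟩ := ih (a + 1) (by omega)
      constructor
      · intro hn j hj1 hj2
        rcases eq_or_lt_of_le hj1 with h | h
        · rw [← h]; exact hmatch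
        · exact ihn hn j (by omega) hj2
      · intro j hj
        obtain ⟨h1, h2, h3, h4⟩ := ihs j hj
        refine ⟨by omega, h2, h3, ?_⟩
        intro j' hj1 hj2
        rcases eq_or_lt_of_le hj1 with h | h
        · rw [← h]; exact hmatch
        · exact h4 j' (by omega) hj2

theorem loopA_spec (xs : List (List Int)) :
    ∀ (tail : List (List Int)) (s : Int), 0 ≤ s → tail = xs.drop s.toNat →
    ∃ r, loopA xs (PySem.List.enumerate tail s) = renderI xs r ∧ IsMinFromA xs s r := by
  intro tail
  induction tail with
  | nil =>
    intro s hs hdrop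
    refine ⟨none, by simp [PySem.List.enumerate_nil, loopA, renderI], ?_⟩
    have hlen : xs.length ≤ s.toNat := by
      by_contra h
      have := congrArg List.length hdrop
      simp [List.length_drop] at this
      omega
    simp only [IsMinFromA]
    intro i j hi hp
    obtain ⟨h1, h2, h3, _⟩ := hp
    omega
  | cons t rest ih =>
    intro s hs hdrop
    have hslen : s.toNat < xs.length := by
      by_contra h
      rw [List.drop_eq_nil_of_le (by omega)] at hdrop
      simp at hdrop
    have h0 : (xs.drop s.toNat)[0]? = some t := by rw [← hdrop]; rfl
    have hget : PySem.List.pyGet? xs s = some t := by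
      rw [PySem.List.pyGet?_of_nonneg xs hs]
      simpa [List.getElem?_drop] using h0
    have hrest : rest = xs.drop (s + 1).toNat := by
      have h1 : (s + 1).toNat = s.toNat + 1 := by omega
      have h2 : xs.drop (s.toNat + 1) = (xs.drop s.toNat).drop 1 := by
        rw [List.drop_drop]
      rw [h1, h2, ← hdrop]
      rfl
    cases hf : findJA xs t (PySem.List.pyRange (s + 1) (xs.length : Int) 1) with
    | some j =>
      refine ⟨some (s, j), ?_, ?_⟩
      · simp [PySem.List.enumerate_cons, loopA, hf, renderI]
      · obtain ⟨hj1, hj2, hj3, hj4⟩ :=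
          (findJA_range xs t (((xs.length : Int) - (s + 1)).toNat) (s + 1) rfl).2 j hf
        refine ⟨⟨hs, by omega, hj2, by rw [hget, hj3]⟩, le_rfl, ?_⟩
        intro i' j' hi' hp
        obtain ⟨p1, p2, p3, p4⟩ := hp
        rcases eq_or_lt_of_le hi' with h | h
        · right
          refine ⟨h, ?_⟩
          by_contra hcon
          refine hj4 j' (by omega) (by omega) ?_
          rw [← p4, ← h, hget]
        · left; exact h
    | none =>
      have hnone := (findJA_range xs t (((xs.length : Int) - (s + 1)).toNat) (s + 1) rfl).1 hf
      obtain ⟨r, hr, hmin⟩ := ih (s + 1) (by omega) hrest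
      have hnos : ∀ j', ¬ Pair xs s j' := by
        intro j' hp
        obtain ⟨p1, p2, p3, p4⟩ := hp
        refine hnone j' (by omega) p3 ?_
        rw [← p4, hget]
      refine ⟨r, ?_, ?_⟩
      · simpa [PySem.List.enumerate_cons, loopA, hf] using hr
      · cases r with
        | none =>
          simp only [IsMinFromA] at hmin ⊢
          intro i j hi hp
          rcases eq_or_lt_of_le hi with h | h
          · exact hnos j (h ▸ hp)
          · exact hmin i j (by omega) hp
        | some p =>
          simp only [IsMinFromA] at hmin ⊢
          obtain ⟨hp, hlo, hm⟩ := hmin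
          refine ⟨hp, by omega, ?_⟩
          intro i' j' hi' hp'
          rcases eq_or_lt_of_le hi' with h | h
          · exact absurd (h ▸ hp') (hnos j')
          · exact hm i' j' (by omega) hp'

theorem foldB_spec (xs : List (List Int)) :
    ∀ (tail : List (List Int)) (s : Int) (d : PySem.Dict (List Int) Int)
      (best : Option (Int × Int)), 0 ≤ s → tail = xs.drop s.toNat →
      DictInv xs s d → IsMinUpto xs s best →
      IsMinUpto xs (xs.length : Int)
        (((PySem.List.enumerate tail s).foldl stepB (d, best)).2) := by
  intro tail
  induction tail with
  | nil =>
    intro s d best hs hdrop hd hb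
    have hlen : xs.length ≤ s.toNat := by
      by_contra h
      have := congrArg List.length hdrop
      simp [List.length_drop] at this
      omega
    simp only [PySem.List.enumerate_nil, List.foldl_nil]
    cases best with
    | none =>
      simp only [IsMinUpto] at hb ⊢
      intro i j hj hp
      exact hb i j (by obtain ⟨_, _, h3, _⟩ := hp; omega) hp
    | some b =>
      simp only [IsMinUpto] at hb ⊢
      obtain ⟨hpb, hbs, hmb⟩ := hb
      exact ⟨hpb, hpb.2.2.1, fun i' j' hj' hp' =>
        hmb i' j' (by obtain ⟨_, _, h3, _⟩ := hp'; omega) hp'⟩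
  | cons t rest ih =>
    intro s d best hs hdrop hd hb
    have hslen : s.toNat < xs.length := by
      by_contra h
      rw [List.drop_eq_nil_of_le (by omega)] at hdrop
      simp at hdrop
    have h0 : (xs.drop s.toNat)[0]? = some t := by rw [← hdrop]; rfl
    have hget : PySem.List.pyGet? xs s = some t := by
      rw [PySem.List.pyGet?_of_nonneg xs hs]
      simpa [List.getElem?_drop] using h0
    have hrest : rest = xs.drop (s + 1).toNat := by
      have h1 : (s + 1).toNat = s.toNat + 1 := by omega
      have h2 : xs.drop (s.toNat + 1) = (xs.drop s.toNat).drop 1 := by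
        rw [List.drop_drop]
      rw [h1, h2, ← hdrop]
      rfl
    have hpair_s : ∀ i', Pair xs i' s ↔
        (0 ≤ i' ∧ i' < s ∧ PySem.List.pyGet? xs i' = some t) := by
      intro i'
      constructor
      · rintro ⟨p1, p2, p3, p4⟩
        exact ⟨p1, p2, by rw [p4, hget]⟩
      · rintro ⟨p1, p2, p3⟩
        exact ⟨p1, p2, by omega, by rw [p3, hget]⟩
    rw [PySem.List.enumerate_cons, List.foldl_cons]
    cases hdi : d.get? t with
    | some i =>
      obtain ⟨hi0, his, hocc, hmini⟩ := (hd t i).1 hdi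
      have hile : ∀ i', 0 ≤ i' → PySem.List.pyGet? xs i' = some t → i ≤ i' := by
        intro i' h1 h2
        by_contra hcon
        exact hmini i' h1 (by omega) h2
      have hd' : DictInv xs (s + 1) d := by
        intro v i'
        constructor
        · intro h
          obtain ⟨a1, a2, a3, a4⟩ := (hd v i').1 h
          exact ⟨a1, by omega, a3, a4⟩
        · rintro ⟨a1, a2, a3, a4⟩
          apply (hd v i').2
          refine ⟨a1, ?_, a3, a4⟩
          by_contra hcon
          have hieq : i' = s := by omega
          have hvt : some v = some t := by rw [← hget, ← hieq, a3]
          refine a4 i hi0 (by omega) ?_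
          rw [Option.some_inj.mp hvt]
          exact hocc
      have hpis : Pair xs i s := (hpair_s i).2 ⟨hi0, his, hocc⟩
      cases best with
      | none =>
        have hstep : stepB (d, none) (s, t) = (d, some (i, s)) := by
          simp [stepB, hdi]
        rw [hstep]
        have hb' : IsMinUpto xs (s + 1) (some (i, s)) := by
          simp only [IsMinUpto] at hb ⊢
          refine ⟨hpis, by omega, ?_⟩
          intro i' j' hj' hp'
          by_cases hjs : j' < s
          · exact absurd hp' (hb i' j' hjs)
          · have hjeq : j' = s := by omega
            obtain ⟨q1, q2, q3⟩ := (hpair_s i').1 (hjeq ▸ hp')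
            have := hile i' q1 q3
            omega
        exact ih (s + 1) d _ (by omega) hrest hd' hb'
      | some b =>
        simp only [IsMinUpto] at hb
        obtain ⟨hpb, hbs, hmb⟩ := hb
        by_cases hib : i < b.1
        · have hstep : stepB (d, some b) (s, t) = (d, some (i, s)) := by
            simp [stepB, hdi, hib]
          rw [hstep]
          have hb' : IsMinUpto xs (s + 1) (some (i, s)) := by
            simp only [IsMinUpto]
            refine ⟨hpis, by omega, ?_⟩
            intro i' j' hj' hp'
            by_cases hjs : j' < s
            · have := hmb i' j' hjs hp'
              omega
            · have hjeq : j' = s := by omega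
              obtain ⟨q1, q2, q3⟩ := (hpair_s i').1 (hjeq ▸ hp')
              have := hile i' q1 q3
              omega
          exact ih (s + 1) d _ (by omega) hrest hd' hb'
        · have hstep : stepB (d, some b) (s, t) = (d, some b) := by
            simp [stepB, hdi, hib]
          rw [hstep]
          have hb' : IsMinUpto xs (s + 1) (some b) := by
            simp only [IsMinUpto]
            refine ⟨hpb, by omega, ?_⟩
            intro i' j' hj' hp'
            by_cases hjs : j' < s
            · exact hmb i' j' hjs hp'
            · have hjeq : j' = s := by omega
              obtain ⟨q1, q2, q3⟩ := (hpair_s i').1 (hjeq ▸ hp')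
              have h1 := hile i' q1 q3
              by_cases hbi' : b.1 = i'
              · right; exact ⟨hbi', by omega⟩
              · left; omega
          exact ih (s + 1) d _ (by omega) hrest hd' hb'
    | none =>
      have hF2 : ∀ i', 0 ≤ i' → i' < s → PySem.List.pyGet? xs i' ≠ some t := by
        intro i' h1 h2 hocc'
        have hex : ∃ n : ℕ, PySem.List.pyGet? xs (n : Int) = some t :=
          ⟨i'.toNat, by rwa [Int.toNat_of_nonneg h1]⟩
        have hk := Nat.find_spec hex
        have hkle : Nat.find hex ≤ i'.toNat :=
          Nat.find_min' hex (by rwa [Int.toNat_of_nonneg h1])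
        have hmin' : ∀ i'', 0 ≤ i'' → i'' < ((Nat.find hex : ℕ) : Int) →
            PySem.List.pyGet? xs i'' ≠ some t := by
          intro i'' hb1 hb2 hocc''
          have hfm := Nat.find_min hex (m := i''.toNat) (by omega)
          rw [Int.toNat_of_nonneg hb1] at hfm
          exact hfm hocc''
        have hsome := (hd t ((Nat.find hex : ℕ) : Int)).2
          ⟨by positivity, by omega, hk, hmin'⟩
        rw [hdi] at hsome
        exact absurd hsome (by simp)
      have hstep : stepB (d, best) (s, t) = (d.insert t s, best) := by
        simp [stepB, hdi]
      rw [hstep]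
      have hd' : DictInv xs (s + 1) (d.insert t s) := by
        intro v i'
        rw [PySem.Dict.get?_insert]
        by_cases hv : v = t
        · rw [if_pos hv, hv]
          constructor
          · intro h
            rw [← Option.some_inj.mp h]
            exact ⟨hs, by omega, hget, hF2⟩
          · rintro ⟨a1, a2, a3, a4⟩
            have : i' = s := by
              by_contra hcon
              exact hF2 i' a1 (by omega) a3
            rw [this]
        · rw [if_neg hv]
          constructor
          · intro h
            obtain ⟨a1, a2, a3, a4⟩ := (hd v i').1 h
            exact ⟨a1, by omega, a3, a4⟩
          · rintro ⟨a1, a2, a3, a4⟩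
            apply (hd v i').2
            refine ⟨a1, ?_, a3, a4⟩
            by_contra hcon
            have hieq : i' = s := by omega
            rw [hieq, hget] at a3
            exact hv (Option.some_inj.mp a3).symm
      have hb' : IsMinUpto xs (s + 1) best := by
        cases best with
        | none =>
          simp only [IsMinUpto] at hb ⊢
          intro i j hj hp
          by_cases hjs : j < s
          · exact hb i j hjs hp
          · have hjeq : j = s := by omega
            obtain ⟨q1, q2, q3⟩ := (hpair_s i).1 (hjeq ▸ hp)
            exact hF2 i q1 q2 q3
        | some b =>
          simp only [IsMinUpto] at hb ⊢
          obtain ⟨hpb, hbs, hmb⟩ := hb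
          refine ⟨hpb, by omega, ?_⟩
          intro i' j' hj' hp'
          by_cases hjs : j' < s
          · exact hmb i' j' hjs hp'
          · have hjeq : j' = s := by omega
            obtain ⟨q1, q2, q3⟩ := (hpair_s i').1 (hjeq ▸ hp')
            exact absurd q3 (hF2 i' q1 q2)
      exact ih (s + 1) (d.insert t s) best (by omega) hrest hd' hb'

theorem min_unique (xs : List (List Int)) (r r' : Option (Int × Int))
    (hA : IsMinFromA xs 0 r) (hB : IsMinUpto xs (xs.length : Int) r') : r = r' := by
  cases r with
  | none =>
    cases r' with
    | none => rfl
    | some q =>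
      exfalso
      simp only [IsMinUpto] at hB
      obtain ⟨hq, _, _⟩ := hB
      exact hA q.1 q.2 hq.1 hq
  | some p =>
    cases r' with
    | none =>
      exfalso
      simp only [IsMinFromA] at hA
      obtain ⟨hp, _, _⟩ := hA
      exact hB p.1 p.2 hp.2.2.1 hp
    | some q =>
      simp only [IsMinFromA] at hA
      simp only [IsMinUpto] at hB
      obtain ⟨hpA, _, hmA⟩ := hA
      obtain ⟨hpB, _, hmB⟩ := hB
      have h1 := hmA q.1 q.2 hpB.1 hpB
      have h2 := hmB p.1 p.2 hpA.2.2.1 hpA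
      have hq : p.1 = q.1 ∧ p.2 = q.2 := by omega
      obtain ⟨e1, e2⟩ := hq
      cases p; cases q
      simp_all

-- ===== VERDICT (by name: the statement is the Claim_ definition above) =====
theorem detect_attractors_spec : Claim_equal_detect_attractors := by
  intro xs _
  unfold Spec_detect_attractors
  obtain ⟨r, hr, hmin⟩ := loopA_spec xs xs 0 le_rfl (by simp)
  have hfold := foldB_spec xs xs 0 PySem.Dict.empty none le_rfl (by simp)
    (by intro v i; simp [PySem.Dict.get?_empty]; omega)
    (by simp only [IsMinUpto]; intro i j hj hp; obtain ⟨_, _, _, _⟩ := hp; omega)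
  have hrr : r = ((PySem.List.enumerate xs 0).foldl stepB (PySem.Dict.empty, none)).2 :=
    min_unique xs _ _ hmin hfold
  show detect_attractors xs = detect_attractors_alt xs
  rw [detect_attractors, detect_attractors_alt, hr, hrr]
  cases h : ((PySem.List.enumerate xs 0).foldl stepB (PySem.Dict.empty, none)).2 with
  | none => simp [renderI]
  | some p => simp [renderI]
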